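-- pv_equiv track=rewrite | github.com/LiYichong1996/DRAG | refine_tools/refine.py | bracket_to_bonds
-- ===== SOURCE A (Python) =====
-- def bracket_to_bonds(structure):
--     bonds = [None]*len(structure)
--     opening = []
--     for i,c in enumerate(structure):
--         if c == '(':
--             opening.append(i)
--         elif c == ')':
--             j = opening.pop()
--             bonds[i] = j
--             bonds[j] = i
--     reshaped_bonds = []
--     for i in range(len(bonds)):
--         if bonds[i] != None:
--             pair = [i, bonds[i]]
--             if pair not in reshaped_bonds and [bonds[i], i] not in reshaped_bonds:
--                 reshaped_bonds.append(pair)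
--     return reshaped_bonds
-- ===== SOURCE B (Python) =====
-- def bracket_to_bonds(structure):
--     stack = []
--     pairs = []
--     for i, c in enumerate(structure):
--         if c == '(':
--             stack.append(i)
--         elif c == ')':
--             j = stack.pop()
--             pairs.append((j, i))
--     return [[j, i] for j, i in sorted(pairs, key=lambda p: p[0])]
-- ===== Notes on version B (the rewrite author's own statement) =====
-- stated objective: faster
-- what changed: B emits each bond pair directly at the moment the closing bracket pops its match off the stack and sorts the emitted pairs by opening index at the end, replacing A's bonds array plus the quadratic second pass that rebuilds pairs with list-membership dedup scans.
import Mathlib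
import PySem

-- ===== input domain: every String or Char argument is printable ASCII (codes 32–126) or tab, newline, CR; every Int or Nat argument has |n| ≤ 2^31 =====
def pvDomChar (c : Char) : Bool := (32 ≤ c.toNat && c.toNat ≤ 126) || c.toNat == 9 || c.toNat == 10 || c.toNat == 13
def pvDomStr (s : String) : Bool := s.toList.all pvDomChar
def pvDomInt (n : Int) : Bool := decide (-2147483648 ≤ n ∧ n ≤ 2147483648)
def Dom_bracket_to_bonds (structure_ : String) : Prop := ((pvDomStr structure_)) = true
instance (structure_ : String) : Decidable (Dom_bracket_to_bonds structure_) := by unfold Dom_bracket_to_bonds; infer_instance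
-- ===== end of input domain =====

-- B replaces A's bonds array + quadratic dedup pass by a single stack pass that emits each
-- pair once and a final sort by opening index (objective: faster).


-- ===== PORT A =====
-- first loop of A: fill the bonds array, maintaining the 'opening' stack
def pvA_scan : List Char → Nat → List (Option Nat) → List Nat → List (Option Nat) × List Nat
  | [], _, bonds, opening => (bonds, opening)
  | c :: cs, i, bonds, opening =>
    if c = '(' then pvA_scan cs (i + 1) bonds (opening ++ [i])
    else if c = ')' then
      match opening.getLast? with
      | some j => pvA_scan cs (i + 1) ((bonds.set i (some j)).set j (some i)) opening.dropLast
      | none => pvA_scan cs (i + 1) bonds opening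
        -- Python raises IndexError on opening.pop() here; Pre_ excludes these inputs
    else pvA_scan cs (i + 1) bonds opening

-- second loop of A: rebuild the pair list from bonds with the membership dedup
def pvA_reshape (bonds : List (Option Nat)) : List (List Int) :=
  (List.range bonds.length).foldl (fun acc i =>
    match bonds.getD i none with
    | some b =>
        if [(i : Int), (b : Int)] ∉ acc ∧ [(b : Int), (i : Int)] ∉ acc then
          acc ++ [[(i : Int), (b : Int)]]
        else acc
    | none => acc) []

def bracket_to_bonds (structure_ : String) : List (List Int) :=
  pvA_reshape (pvA_scan structure_.toList 0
    (List.replicate structure_.toList.length none) []).1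

-- ===== PORT B =====
-- B's single stack pass: emit (open, close) when a ')' pops its match
def pvB_scan : List Char → Nat → List Nat → List (Nat × Nat) → List (Nat × Nat)
  | [], _, _, pairs => pairs
  | c :: cs, i, stack, pairs =>
    if c = '(' then pvB_scan cs (i + 1) (stack ++ [i]) pairs
    else if c = ')' then
      match stack.getLast? with
      | some j => pvB_scan cs (i + 1) stack.dropLast (pairs ++ [(j, i)])
      | none => pvB_scan cs (i + 1) stack pairs
        -- Python raises IndexError on stack.pop() here; Pre_ excludes these inputs
    else pvB_scan cs (i + 1) stack pairs

def bracket_to_bonds_alt (structure_ : String) : List (List Int) :=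
  (PySem.List.sorted (pvB_scan structure_.toList 0 [] []) (fun p => p.1) false).map
    (fun p => [(p.1 : Int), (p.2 : Int)])

-- ===== PRECONDITION & SPEC =====
-- Pre_ excludes unbalanced strings in which some prefix has more closing than opening brackets:
-- there both A and B raise IndexError popping the empty stack. (The ports totalize that branch, so
-- the equivalence proof below happens not to need the Pre_ hypothesis.)
def Pre_bracket_to_bonds (structure_ : String) : Prop :=
  ∀ k < structure_.toList.length + 1,
    (structure_.toList.take k).count ')' ≤ (structure_.toList.take k).count '('
instance (structure_ : String) : Decidable (Pre_bracket_to_bonds structure_) := by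
  unfold Pre_bracket_to_bonds; infer_instance

def pvWitness_bracket_to_bonds : String := "(())()"

def Spec_bracket_to_bonds (structure_ : String) (out : List (List Int)) : Prop := out = bracket_to_bonds_alt structure_
instance (structure_ : String) (out : List (List Int)) : Decidable (Spec_bracket_to_bonds structure_ out) := by unfold Spec_bracket_to_bonds; infer_instance

-- ===== CLAIM (what is proved, stated in full; the proofs are below) =====
def Claim_equal_bracket_to_bonds : Prop := ∀ (structure_ : String), Dom_bracket_to_bonds structure_ → Pre_bracket_to_bonds structure_ → Spec_bracket_to_bonds structure_ (bracket_to_bonds structure_)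


-- ===== LEMMAS AND PROOFS =====

-- the canonical pair list: opens in increasing order, read off a symmetric bonds array
def pvCanonF (bonds : List (Option Nat)) (i : Nat) : Option (Nat × Nat) :=
  match bonds.getD i none with
  | some b => if i < b then some (i, b) else none
  | none => none

def pvCanon (bonds : List (Option Nat)) : List (Nat × Nat) :=
  (List.range bonds.length).filterMap (pvCanonF bonds)

-- joint invariant of A's first loop and B's loop
def pvInv (k : Nat) (bonds : List (Option Nat)) (opening : List Nat) (pairs : List (Nat × Nat)) : Prop :=
  opening.Pairwise (· < ·) ∧
  (∀ x ∈ opening, x < k ∧ bonds.getD x none = none) ∧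
  (∀ p ∈ pairs, p.1 < p.2 ∧ p.2 < k) ∧
  ((pairs.map Prod.snd).Pairwise (· < ·)) ∧
  (∀ x v, bonds.getD x none = some v ↔ ((x, v) ∈ pairs ∨ (v, x) ∈ pairs))

lemma pvGetD_set_self (l : List (Option Nat)) (i : Nat) (v : Option Nat) (hi : i < l.length) :
    (l.set i v).getD i none = v := by
  simp [List.getD_eq_getElem?_getD, hi]

lemma pvGetD_set_ne (l : List (Option Nat)) (i x : Nat) (v : Option Nat) (hx : x ≠ i) :
    (l.set i v).getD x none = l.getD x none := by
  simp [List.getD_eq_getElem?_getD, (Ne.symm hx : i ≠ x)]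

-- a fresh index k is unbonded under the invariant
lemma pvInv_getD_fresh (k x : Nat) (bonds : List (Option Nat)) (opening : List Nat)
    (pairs : List (Nat × Nat)) (hinv : pvInv k bonds opening pairs) (hx : k ≤ x) :
    bonds.getD x none = none := by
  obtain ⟨-, -, h3, -, h5⟩ := hinv
  cases hb : bonds.getD x none with
  | none => rfl
  | some v =>
    rcases (h5 x v).mp hb with h | h
    · rcases h3 _ h with ⟨h1, h2⟩; omega
    · rcases h3 _ h with ⟨h1, h2⟩; omega

lemma pvInv_mono (k : Nat) (bonds : List (Option Nat)) (opening : List Nat)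
    (pairs : List (Nat × Nat)) (hinv : pvInv k bonds opening pairs) :
    pvInv (k + 1) bonds opening pairs := by
  obtain ⟨h1, h2, h3, h4, h5⟩ := hinv
  refine ⟨h1, fun x hx => ⟨by have := (h2 x hx).1; omega, (h2 x hx).2⟩,
    fun p hp => ⟨(h3 p hp).1, by have := (h3 p hp).2; omega⟩, h4, h5⟩

lemma pvInv_push (k : Nat) (bonds : List (Option Nat)) (opening : List Nat)
    (pairs : List (Nat × Nat)) (hinv : pvInv k bonds opening pairs) :
    pvInv (k + 1) bonds (opening ++ [k]) pairs := by
  have hfresh := pvInv_getD_fresh k k bonds opening pairs hinv le_rfl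
  obtain ⟨h1, h2, h3, h4, h5⟩ := hinv
  refine ⟨?_, ?_, fun p hp => ⟨(h3 p hp).1, by have := (h3 p hp).2; omega⟩, h4, h5⟩
  · rw [List.pairwise_append]
    exact ⟨h1, List.pairwise_singleton _ _, fun x hx y hy => by
      simp at hy; subst hy; exact (h2 x hx).1⟩
  · intro x hx
    rcases List.mem_append.mp hx with h | h
    · exact ⟨by have := (h2 x h).1; omega, (h2 x h).2⟩
    · simp at h; subst h; exact ⟨by omega, hfresh⟩

lemma pvInv_pop (k j : Nat) (bonds : List (Option Nat)) (opening : List Nat)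
    (pairs : List (Nat × Nat)) (hinv : pvInv k bonds opening pairs)
    (hl : opening.getLast? = some j) (hk : k < bonds.length) :
    pvInv (k + 1) ((bonds.set k (some j)).set j (some k)) opening.dropLast (pairs ++ [(j, k)]) := by
  have ho : opening.dropLast ++ [j] = opening := List.dropLast_append_getLast? j hl
  obtain ⟨h1, h2, h3, h4, h5⟩ := hinv
  have hjmem : j ∈ opening := by rw [← ho]; simp
  obtain ⟨hjk, hjnone⟩ := h2 j hjmem
  have hjlen : j < bonds.length := by omega
  have hlt_j : ∀ x ∈ opening.dropLast, x < j := by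
    intro x hx
    have := h1
    rw [← ho, List.pairwise_append] at this
    exact this.2.2 x hx j (by simp)
  -- getD of the doubly-set array
  have hget : ∀ x, ((bonds.set k (some j)).set j (some k)).getD x none =
      if x = j then some k else if x = k then some j else bonds.getD x none := by
    intro x
    by_cases hxj : x = j
    · subst hxj
      rw [pvGetD_set_self _ _ _ (by simpa using hjlen)]
      simp
    · rw [pvGetD_set_ne _ _ _ _ hxj]
      by_cases hxk : x = k
      · subst hxk; rw [pvGetD_set_self _ _ _ hk]; simp [hxj]
      · rw [pvGetD_set_ne _ _ _ _ hxk]; simp [hxj, hxk]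
  refine ⟨?_, ?_, ?_, ?_, ?_⟩
  · exact h1.sublist (List.dropLast_sublist opening)
  · intro x hx
    have hxo : x ∈ opening := (List.dropLast_sublist opening).mem hx
    obtain ⟨hxk, hxnone⟩ := h2 x hxo
    have hxj : x < j := hlt_j x hx
    rw [hget]
    simp only [if_neg (by omega : x ≠ j), if_neg (by omega : x ≠ k)]
    exact ⟨by omega, hxnone⟩
  · intro p hp
    rcases List.mem_append.mp hp with h | h
    · exact ⟨(h3 p h).1, by have := (h3 p h).2; omega⟩
    · simp at h; subst h; exact ⟨hjk, by omega⟩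
  · rw [List.map_append, List.pairwise_append]
    refine ⟨h4, by simp, ?_⟩
    intro a ha b hb
    simp at hb; subst hb
    simp only [List.mem_map] at ha
    obtain ⟨p, hp, rfl⟩ := ha
    exact (h3 p hp).2
  · intro x v
    rw [hget x]
    simp only [List.mem_append, List.mem_singleton, Prod.mk.injEq]
    by_cases hxj : x = j
    · rw [if_pos hxj]
      constructor
      · intro h
        have hv : k = v := by injection h
        exact Or.inl (Or.inr ⟨hxj, hv.symm⟩)
      · rintro ((hp | ⟨hx, hv⟩) | (hp | ⟨hv, hx⟩))
        · exfalso
          have hh := (h5 x v).mpr (Or.inl hp)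
          rw [hxj, hjnone] at hh; cases hh
        · rw [hv]
        · exfalso
          have hh := (h5 x v).mpr (Or.inr hp)
          rw [hxj, hjnone] at hh; cases hh
        · omega
    · by_cases hxk : x = k
      · rw [if_neg hxj, if_pos hxk]
        constructor
        · intro h
          have hv : j = v := by injection h
          exact Or.inr (Or.inr ⟨hv.symm, hxk⟩)
        · rintro ((hp | ⟨hx, hv⟩) | (hp | ⟨hv, hx⟩))
          · exfalso; rcases h3 _ hp with ⟨hh1, hh2⟩; simp at hh1 hh2; omega
          · exact absurd hx hxj
          · exfalso; rcases h3 _ hp with ⟨hh1, hh2⟩; simp at hh1 hh2; omega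
          · rw [hv]
      · rw [if_neg hxj, if_neg hxk, h5 x v]
        constructor
        · rintro (h | h)
          · exact Or.inl (Or.inl h)
          · exact Or.inr (Or.inl h)
        · rintro ((hp | ⟨hx, hv⟩) | (hp | ⟨hv, hx⟩))
          · exact Or.inl hp
          · exact absurd hx hxj
          · exact Or.inr hp
          · exact absurd hx hxk

lemma pvScan_inv (cs : List Char) (k : Nat) (bonds : List (Option Nat))
    (opening : List Nat) (pairs : List (Nat × Nat))
    (hlen : k + cs.length = bonds.length) (hinv : pvInv k bonds opening pairs) :
    pvInv bonds.length (pvA_scan cs k bonds opening).1 (pvA_scan cs k bonds opening).2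
      (pvB_scan cs k opening pairs)
    ∧ (pvA_scan cs k bonds opening).1.length = bonds.length := by
  induction cs generalizing k bonds opening pairs with
  | nil =>
    simp only [pvA_scan, pvB_scan]
    have : k = bonds.length := by simpa using hlen
    subst this
    exact ⟨hinv, trivial⟩
  | cons c cs ih =>
    simp only [pvA_scan, pvB_scan]
    by_cases hc : c = '('
    · simp only [if_pos hc]
      exact ih (k + 1) bonds (opening ++ [k]) pairs (by simp at hlen ⊢; omega)
        (pvInv_push k bonds opening pairs hinv)
    · by_cases hc2 : c = ')'
      · simp only [if_neg hc, if_pos hc2]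
        cases hl : opening.getLast? with
        | none =>
          exact ih (k + 1) bonds opening pairs (by simp at hlen ⊢; omega)
            (pvInv_mono k bonds opening pairs hinv)
        | some j =>
          have hk : k < bonds.length := by simp at hlen; omega
          have h := ih (k + 1) ((bonds.set k (some j)).set j (some k)) opening.dropLast
            (pairs ++ [(j, k)]) (by simp at hlen ⊢; omega)
            (pvInv_pop k j bonds opening pairs hinv hl hk)
          simpa using h
      · simp only [if_neg hc, if_neg hc2]
        exact ih (k + 1) bonds opening pairs (by simp at hlen ⊢; omega)
          (pvInv_mono k bonds opening pairs hinv)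

lemma pvCanonF_some (bonds : List (Option Nat)) (i : Nat) (p : Nat × Nat) :
    pvCanonF bonds i = some p ↔ (bonds.getD i none = some p.2 ∧ i < p.2 ∧ p.1 = i) := by
  unfold pvCanonF
  cases h : bonds.getD i none with
  | none => simp
  | some b =>
    by_cases hb : i < b
    · simp only [if_pos hb, Option.some_inj]
      constructor
      · rintro rfl; exact ⟨rfl, hb, rfl⟩
      · rintro ⟨h1, h2, h3⟩
        have : b = p.2 := by simpa using h1
        cases p; simp_all
    · simp only [if_neg hb]
      constructor
      · rintro ⟨⟩
      · rintro ⟨h1, h2, h3⟩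
        have : b = p.2 := by simpa using h1
        omega

lemma pvMem_canon (bonds : List (Option Nat)) (p : Nat × Nat) :
    p ∈ pvCanon bonds ↔ (bonds.getD p.1 none = some p.2 ∧ p.1 < p.2) := by
  unfold pvCanon
  rw [List.mem_filterMap]
  constructor
  · rintro ⟨i, hi, hf⟩
    rcases (pvCanonF_some bonds i p).mp hf with ⟨hg, hlt, hfst⟩
    subst hfst; exact ⟨hg, hlt⟩
  · rintro ⟨hg, hlt⟩
    refine ⟨p.1, ?_, (pvCanonF_some bonds p.1 p).mpr ⟨hg, hlt, rfl⟩⟩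
    rw [List.mem_range]
    by_contra h
    rw [List.getD_eq_default bonds (none : Option Nat) (by omega)] at hg
    cases hg

lemma pvCanon_pairwise (bonds : List (Option Nat)) :
    (pvCanon bonds).Pairwise (fun a b => a.1 < b.1) := by
  unfold pvCanon
  rw [List.pairwise_filterMap]
  refine List.pairwise_lt_range.imp_of_mem ?_
  intro a a' _ _ hlt b hb b' hb'
  rw [pvCanonF_some] at hb hb'
  rw [hb.2.2, hb'.2.2]
  exact hlt

lemma pvSorted_eq (bonds : List (Option Nat)) (pairs : List (Nat × Nat))
    (h2 : ∀ p ∈ pairs, p.1 < p.2)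
    (h4 : (pairs.map Prod.snd).Pairwise (· < ·))
    (h5 : ∀ x v, bonds.getD x none = some v ↔ ((x, v) ∈ pairs ∨ (v, x) ∈ pairs)) :
    PySem.List.sorted pairs (fun p => p.1) false = pvCanon bonds := by
  have hndp : pairs.Nodup := by
    have := (List.pairwise_map.mp h4).imp (fun {a b} h => (fun hab => by subst hab; omega : a ≠ b))
    exact this
  have hndc : (pvCanon bonds).Nodup :=
    (pvCanon_pairwise bonds).imp (fun {a b} h => (fun hab => by subst hab; omega : a ≠ b))
  have hmem : ∀ p, p ∈ pvCanon bonds ↔ p ∈ pairs := by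
    intro p
    rw [pvMem_canon]
    constructor
    · rintro ⟨hg, hlt⟩
      rcases (h5 p.1 p.2).mp hg with h | h
      · exact h
      · exfalso; have := h2 _ h; omega
    · intro hp
      exact ⟨(h5 p.1 p.2).mpr (Or.inl hp), h2 p hp⟩
  have hperm : (pvCanon bonds).Perm pairs :=
    (List.perm_ext_iff_of_nodup hndc hndp).mpr hmem
  exact PySem.List.sorted_eq_of_perm_of_pairwise_lt pairs (pvCanon bonds) (fun p => p.1) hperm (pvCanon_pairwise bonds)

lemma pvReshape_aux (bonds : List (Option Nat))
    (hsym : ∀ x v, bonds.getD x none = some v → x ≠ v ∧ bonds.getD v none = some x) (m : Nat) :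
    (List.range m).foldl (fun acc i =>
      match bonds.getD i none with
      | some b =>
          if [(i : Int), (b : Int)] ∉ acc ∧ [(b : Int), (i : Int)] ∉ acc then
            acc ++ [[(i : Int), (b : Int)]]
          else acc
      | none => acc) [] =
    ((List.range m).filterMap (pvCanonF bonds)).map (fun p => [(p.1 : Int), (p.2 : Int)]) := by
  induction m with
  | zero => simp
  | succ m ih =>
    rw [List.range_succ, List.foldl_append, List.filterMap_append, List.map_append, ih]
    simp only [List.foldl_cons, List.foldl_nil]
    have hacc_mem : ∀ q : List Int, q ∈ ((List.range m).filterMap (pvCanonF bonds)).map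
        (fun p => [(p.1 : Int), (p.2 : Int)]) → ∃ p : Nat × Nat, p.1 < m ∧
        bonds.getD p.1 none = some p.2 ∧ p.1 < p.2 ∧ q = [(p.1 : Int), (p.2 : Int)] := by
      intro q hq
      rw [List.mem_map] at hq
      obtain ⟨p, hp, rfl⟩ := hq
      rw [List.mem_filterMap] at hp
      obtain ⟨i, hi, hf⟩ := hp
      rcases (pvCanonF_some bonds i p).mp hf with ⟨hg, hlt, hfst⟩
      subst hfst
      exact ⟨p, List.mem_range.mp hi, hg, hlt, rfl⟩
    cases hb : bonds.getD m none with
    | none =>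
      have hf : pvCanonF bonds m = none := by unfold pvCanonF; rw [hb]
      simp [hf]
    | some b =>
      obtain ⟨hne, hbsym⟩ := hsym m b hb
      by_cases hmb : m < b
      · have hc1 : [(m : Int), (b : Int)] ∉ ((List.range m).filterMap (pvCanonF bonds)).map
            (fun p => [(p.1 : Int), (p.2 : Int)]) := by
          intro hmem
          obtain ⟨p, hpm, -, -, hq⟩ := hacc_mem _ hmem
          have h1 : (m : Int) = (p.1 : Int) ∧ (b : Int) = (p.2 : Int) := by simpa using hq
          have : m = p.1 := by exact_mod_cast h1.1
          omega
        have hc2 : [(b : Int), (m : Int)] ∉ ((List.range m).filterMap (pvCanonF bonds)).map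
            (fun p => [(p.1 : Int), (p.2 : Int)]) := by
          intro hmem
          obtain ⟨p, hpm, -, -, hq⟩ := hacc_mem _ hmem
          have h1 : (b : Int) = (p.1 : Int) ∧ (m : Int) = (p.2 : Int) := by simpa using hq
          have : b = p.1 := by exact_mod_cast h1.1
          omega
        have hf : pvCanonF bonds m = some (m, b) := by unfold pvCanonF; rw [hb]; exact if_pos hmb
        simp only [hf, List.filterMap_cons, List.filterMap_nil, List.map_cons, List.map_nil]
        exact if_pos ⟨hc1, hc2⟩
      · have hbm : b < m := by omega
        have hc2 : [(b : Int), (m : Int)] ∈ ((List.range m).filterMap (pvCanonF bonds)).map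
            (fun p => [(p.1 : Int), (p.2 : Int)]) := by
          rw [List.mem_map]
          refine ⟨(b, m), ?_, rfl⟩
          rw [List.mem_filterMap]
          exact ⟨b, List.mem_range.mpr hbm, (pvCanonF_some bonds b (b, m)).mpr ⟨hbsym, hbm, rfl⟩⟩
        have hf : pvCanonF bonds m = none := by unfold pvCanonF; rw [hb]; exact if_neg hmb
        simp only [hf, List.filterMap_cons, List.filterMap_nil, List.map_nil, List.append_nil]
        exact if_neg (by intro h; exact h.2 hc2)

lemma pvReshape_eq (bonds : List (Option Nat))
    (hsym : ∀ x v, bonds.getD x none = some v → x ≠ v ∧ bonds.getD v none = some x) :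
    pvA_reshape bonds = (pvCanon bonds).map (fun p => [(p.1 : Int), (p.2 : Int)]) := by
  unfold pvA_reshape pvCanon
  exact pvReshape_aux bonds hsym bonds.length

-- ===== VERDICT (by name: the statement is the Claim_ definition above) =====
theorem bracket_to_bonds_spec : Claim_equal_bracket_to_bonds := by
  intro s _ _
  unfold Spec_bracket_to_bonds bracket_to_bonds bracket_to_bonds_alt
  have hinv0 : pvInv 0 (List.replicate s.toList.length (none : Option Nat)) [] [] := by
    refine ⟨List.Pairwise.nil, by simp, by simp, by simp, ?_⟩
    intro x v
    constructor
    · intro h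
      rw [List.getD_eq_getElem?_getD, List.getElem?_replicate] at h
      split at h <;> cases h
    · intro h; simp at h
  have h := pvScan_inv s.toList 0 (List.replicate s.toList.length none) [] []
    (by simp) hinv0
  obtain ⟨⟨-, -, h2, h4, h5⟩, -⟩ := h
  have hsym : ∀ x v, (pvA_scan s.toList 0 (List.replicate s.toList.length none) []).1.getD x none
      = some v → x ≠ v ∧
      (pvA_scan s.toList 0 (List.replicate s.toList.length none) []).1.getD v none = some x := by
    intro x v hxv
    rcases (h5 x v).mp hxv with h | h
    · exact ⟨fun he => by have := (h2 _ h).1; omega, (h5 v x).mpr (Or.inr h)⟩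
    · exact ⟨fun he => by have := (h2 _ h).1; omega, (h5 v x).mpr (Or.inl h)⟩
  rw [pvReshape_eq _ hsym, pvSorted_eq _ _ (fun p hp => (h2 p hp).1) h4 h5]
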